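-- pv_equiv track=rewrite | github.com/chetotam/clusters | main.py | update
-- ===== SOURCE A (Python) =====
-- import operator
--
-- def update(cluster, service, count):
--     new_cluster = dict(cluster)
--
--     # first create array of load distribution between servers
--     # as [(<server>, <total_services_running>), ...] sorted in load ascending order
--     load_distribution = sorted(
--         {server: sum(services.values()) for server, services in new_cluster.items()}.items(),
--         key=operator.itemgetter(1)
--     )
--     servers = [server for server, _ in load_distribution]
--     load = [load for _, load in load_distribution]
--
--     # then send service instances one by one to server with lowest load level
--     load.append(999999999) # random big number to help us determine which servers are
--                            # "lowest load" in case they all have equal amount of services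
--     for i in range(len(servers)):
--         while load[i] < load[i + 1]:
--             for j in range(i + 1):
--                 load[j] += 1
--                 try:
--                     new_cluster[servers[j]][service] += 1
--                 except KeyError:
--                     new_cluster[servers[j]][service] = 1
--                 count -= 1
--                 if count == 0:
--                     return new_cluster
-- ===== SOURCE B (Python) =====
-- def update(cluster, service, count):
--     new_cluster = dict(cluster)
--     pairs = sorted(((s, sum(v.values())) for s, v in new_cluster.items()),
--                    key=lambda p: p[1])
--     if not pairs:
--         return None
--     if count <= 0:
--         return new_cluster
--     n = len(pairs)
--     prefix = 0
--     k = n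
--     for i in range(1, n):
--         prefix += pairs[i - 1][1]
--         if count <= i * pairs[i][1] - prefix:
--             k = i
--             break
--     else:
--         prefix += pairs[n - 1][1]
--     level = (count + prefix) // k
--     extra = (count + prefix) % k
--     for pos in range(k):
--         server, base = pairs[pos]
--         add = level - base + (1 if pos < extra else 0)
--         if add > 0:
--             services = new_cluster[server]
--             services[service] = services.get(service, 0) + add
--     return new_cluster
-- ===== Notes on version B (the rewrite author's own statement) =====
-- stated objective: alternative
-- what changed: Replaces the one-instance-at-a-time round-robin filling loop by closed-form water-filling: one linear scan over the sorted loads finds the participating prefix k, the common fill level and remainder come from a single division, and each server receives its whole allotment in one dict update.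
-- outside the precondition, e.g. on update({'a': {}}, 'x', 0): A does not finish within the time limit, B returns {'a': {}}
import Mathlib
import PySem

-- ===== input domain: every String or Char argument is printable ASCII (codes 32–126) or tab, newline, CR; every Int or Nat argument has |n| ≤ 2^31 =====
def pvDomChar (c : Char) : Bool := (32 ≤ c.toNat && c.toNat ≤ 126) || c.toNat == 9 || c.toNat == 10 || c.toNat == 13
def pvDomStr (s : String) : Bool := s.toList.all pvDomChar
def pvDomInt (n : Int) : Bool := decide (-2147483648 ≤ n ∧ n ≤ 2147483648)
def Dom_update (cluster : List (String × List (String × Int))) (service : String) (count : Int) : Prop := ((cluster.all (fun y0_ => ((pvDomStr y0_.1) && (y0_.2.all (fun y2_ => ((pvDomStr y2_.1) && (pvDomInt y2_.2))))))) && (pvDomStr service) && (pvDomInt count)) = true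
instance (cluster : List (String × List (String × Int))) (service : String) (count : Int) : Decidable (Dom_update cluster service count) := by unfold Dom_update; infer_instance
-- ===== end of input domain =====

-- B replaces A's instance-by-instance round-robin filling by closed-form water-filling
-- (find the participating prefix of the sorted loads, then one division gives each
-- server's whole allotment).  Equivalence is about the RETURN value only: the Python A
-- mutates the caller's inner service dicts in place (B performs the same net mutation).

-- ===== PORT A =====
-- try/except bump of new_cluster[server][service]; server is always a key of the dict here
def pvSvcBump (d : PySem.Dict String (PySem.Dict String Int)) (server service : String) :
    PySem.Dict String (PySem.Dict String Int) :=
  d.modify server PySem.Dict.empty (fun svcs => svcs.insert service (svcs.getD service 0 + 1))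

-- the 'for j in range(i+1)' body; .inr = the 'return new_cluster' early exit
def pvInnerA (service : String) (servers : List String) :
    List Nat → List Int → PySem.Dict String (PySem.Dict String Int) → Int →
      (List Int × PySem.Dict String (PySem.Dict String Int) × Int) ⊕
        (PySem.Dict String (PySem.Dict String Int))
  | [], load, nc, c => .inl (load, nc, c)
  | j :: js, load, nc, c =>
    let load' := load.set j (load.getD j 0 + 1)        -- load[j] += 1 (j always in range here)
    let nc' := pvSvcBump nc (servers.getD j "") service
    let c' := c - 1
    if c' = 0 then .inr nc' else pvInnerA service servers js load' nc' c'

-- the 'while load[i] < load[i+1]' loop; fuel only makes the recursion total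
-- (inside Pre_ the loop returns long before the fuel runs out)
def pvWhileA (service : String) (servers : List String) :
    Nat → Nat → List Int → PySem.Dict String (PySem.Dict String Int) → Int →
      (List Int × PySem.Dict String (PySem.Dict String Int) × Int) ⊕
        (Option (PySem.Dict String (PySem.Dict String Int)))
  | 0, _, _, _, _ => .inr none
  | fuel + 1, i, load, nc, c =>
    if load.getD i 0 < load.getD (i + 1) 0 then
      match pvInnerA service servers (List.range (i + 1)) load nc c with
      | .inr d => .inr (some d)
      | .inl (load', nc', c') => pvWhileA service servers fuel i load' nc' c'
    else .inl (load, nc, c)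

-- the 'for i in range(len(servers))' loop; falling through returns Python's None
def pvOuterA (service : String) (servers : List String) (fuel : Nat) :
    List Nat → List Int → PySem.Dict String (PySem.Dict String Int) → Int →
      Option (PySem.Dict String (PySem.Dict String Int))
  | [], _, _, _ => none
  | i :: is, load, nc, c =>
    match pvWhileA service servers fuel i load nc c with
    | .inr r => r
    | .inl (load', nc', c') => pvOuterA service servers fuel is load' nc' c'

def update (cluster : List (String × List (String × Int))) (service : String) (count : Int) :
    Option (List (String × List (String × Int))) :=
  let nc := PySem.Dict.ofList (cluster.map (fun p => (p.1, PySem.Dict.ofList p.2)))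
  let ld := PySem.List.sorted (nc.items.map (fun p => (p.1, p.2.values.sum))) (fun q => q.2) false
  let servers := ld.map (·.1)
  let load := ld.map (·.2) ++ [(999999999 : Int)]
  (pvOuterA service servers (count.toNat + 1) (List.range servers.length) load nc count).map
    (fun d => d.items.map (fun p => (p.1, p.2.items)))

-- ===== PORT B =====
-- 'services[service] = services.get(service, 0) + add' (server always a key here)
def pvAddB (d : PySem.Dict String (PySem.Dict String Int)) (server service : String) (a : Int) :
    PySem.Dict String (PySem.Dict String Int) :=
  d.modify server PySem.Dict.empty (fun svcs => svcs.insert service (svcs.getD service 0 + a))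

-- the 'for i in range(1, n): … break / else:' scan for the participating prefix k
def pvFindK (loads : List Int) (c : Int) : List Nat → Int → Nat × Int
  | [], pre => (loads.length, pre + loads.getD (loads.length - 1) 0)
  | i :: is, pre =>
    let pre' := pre + loads.getD (i - 1) 0
    if c ≤ (i : Int) * loads.getD i 0 - pre' then (i, pre') else pvFindK loads c is pre'

def update_alt (cluster : List (String × List (String × Int))) (service : String) (count : Int) :
    Option (List (String × List (String × Int))) :=
  let nc := PySem.Dict.ofList (cluster.map (fun p => (p.1, PySem.Dict.ofList p.2)))
  let pairs := PySem.List.sorted (nc.items.map (fun p => (p.1, p.2.values.sum))) (fun q => q.2) false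
  if pairs = [] then none
  else if count ≤ 0 then some (nc.items.map (fun p => (p.1, p.2.items)))
  else
    let n := pairs.length
    let kp := pvFindK (pairs.map (·.2)) count (List.range' 1 (n - 1)) 0
    let level := PySem.Int.floordiv (count + kp.2) (kp.1 : Int)
    let extra := PySem.Int.mod (count + kp.2) (kp.1 : Int)
    let nc' := (List.range kp.1).foldl (fun d pos =>
        let pr := pairs.getD pos ("", 0)
        let a := level - pr.2 + (if (pos : Int) < extra then 1 else 0)
        if 0 < a then pvAddB d pr.1 service a else d) nc
    some (nc'.items.map (fun p => (p.1, p.2.items)))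

-- ===== PRECONDITION & SPEC =====
def pvLoadsOf (cluster : List (String × List (String × Int))) : List Int :=
  (PySem.Dict.ofList (cluster.map (fun p => (p.1, PySem.Dict.ofList p.2)))).values.map
    (fun d => d.values.sum)

-- Pre_ excludes counts ≤ 0 and counts above the sentinel capacity Σ(999999999 − load):
-- there A performs ~10^9·|servers| loop iterations before returning None — it effectively
-- diverges — which B cannot reproduce (B returns the cluster resp. the filled cluster at once).
def Pre_update (cluster : List (String × List (String × Int))) (service : String) (count : Int) : Prop :=
  cluster = [] ∨
    (1 ≤ count ∧ (∀ l ∈ pvLoadsOf cluster, l ≤ 999999999) ∧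
      count ≤ ((pvLoadsOf cluster).map (fun l => 999999999 - l)).sum)
instance (cluster : List (String × List (String × Int))) (service : String) (count : Int) :
    Decidable (Pre_update cluster service count) := by unfold Pre_update; infer_instance

def pvWitness_update : (List (String × List (String × Int))) × String × Int :=
  ([("a", [("x", 1)]), ("b", [])], "x", 3)

def Spec_update (cluster : List (String × List (String × Int))) (service : String) (count : Int)
    (out : Option (List (String × List (String × Int)))) : Prop :=
  out = update_alt cluster service count
instance (cluster : List (String × List (String × Int))) (service : String) (count : Int)
    (out : Option (List (String × List (String × Int)))) : Decidable (Spec_update cluster service count out) := by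
  unfold Spec_update; infer_instance

-- ===== CLAIM (what is proved, stated in full; the proofs are below) =====
def Claim_equal_update : Prop := ∀ (cluster : List (String × List (String × Int))) (service : String) (count : Int), Dom_update cluster service count → Pre_update cluster service count → Spec_update cluster service count (update cluster service count)

-- ===== LEMMAS AND PROOFS =====

-- Context: the shared preprocessing of both ports (sorted servers, loads with sentinel, start dict)
structure PvCtx where
  service : String
  servers : List String
  L : List Int
  nc0 : PySem.Dict String (PySem.Dict String Int)
  hlen : L.length = servers.length + 1
  hnodup : servers.Nodup
  hkeys : nc0.keys.Nodup
  hmem : ∀ s ∈ servers, nc0.contains s = true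
  hmono : ∀ t, t + 1 ≤ servers.length → L.getD t 0 ≤ L.getD (t + 1) 0

-- first index of s in l (= l.index(s) when present)
def pvIdx? : List String → String → Option Nat
  | [], _ => none
  | a :: l, s => if a = s then some 0 else (pvIdx? l s).map (· + 1)

theorem pvIdx?_eq (l : List String) (s : String) (t : Nat) (h : pvIdx? l s = some t) :
    t < l.length ∧ l.getD t "" = s := by
  induction l generalizing t with
  | nil => simp [pvIdx?] at h
  | cons a l ih =>
    simp only [pvIdx?] at h
    by_cases ha : a = s
    · rw [if_pos ha] at h
      cases h
      simpa using ha
    · rw [if_neg ha] at h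
      rcases Option.map_eq_some_iff.mp h with ⟨t', ht', rfl⟩
      rcases ih t' ht' with ⟨h1, h2⟩
      exact ⟨by simp only [List.length_cons]; omega, by simpa using h2⟩

theorem pvIdx?_getD (l : List String) (hn : l.Nodup) (j : Nat) (hj : j < l.length) :
    pvIdx? l (l.getD j "") = some j := by
  induction l generalizing j with
  | nil => simp at hj
  | cons a l ih =>
    rcases List.nodup_cons.mp hn with ⟨ha, hn'⟩
    cases j with
    | zero => simp [pvIdx?]
    | succ j =>
      have hj' : j < l.length := by simpa using hj
      have hg : (a :: l).getD (j + 1) "" = l.getD j "" := by simp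
      have hmem : l.getD j "" ∈ l := by
        rw [List.getD_eq_getElem?_getD, List.getElem?_eq_getElem hj']
        exact List.getElem_mem hj'
      simp only [pvIdx?, hg]
      rw [if_neg (by rintro rfl; exact ha hmem), ih hn' j hj']
      rfl

-- the inner dict a state assigns to key s when position t has received f t instances so far
def pvSpecGet (C : PvCtx) (f : Nat → Int) (s : String) : PySem.Dict String Int :=
  match pvIdx? C.servers s with
  | some t =>
    if 0 < f t then
      (C.nc0.getD s PySem.Dict.empty).insert C.service
        ((C.nc0.getD s PySem.Dict.empty).getD C.service 0 + f t)
    else C.nc0.getD s PySem.Dict.empty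
  | none => C.nc0.getD s PySem.Dict.empty

def pvState (C : PvCtx) (nc : PySem.Dict String (PySem.Dict String Int)) (f : Nat → Int) : Prop :=
  nc.keys = C.nc0.keys ∧ ∀ s, nc.getD s PySem.Dict.empty = pvSpecGet C f s

theorem pvSpecGet_congr (C : PvCtx) (f g : Nat → Int) (h : ∀ t, f t = g t) (s : String) :
    pvSpecGet C f s = pvSpecGet C g s := by
  unfold pvSpecGet
  cases pvIdx? C.servers s with
  | none => rfl
  | some t => simp [h t]

theorem pvState_congr (C : PvCtx) (nc : PySem.Dict String (PySem.Dict String Int))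
    (f g : Nat → Int) (h : ∀ t, f t = g t) (hs : pvState C nc f) : pvState C nc g :=
  ⟨hs.1, fun s => (hs.2 s).trans (pvSpecGet_congr C f g h s)⟩

theorem pvServers_getD_mem (C : PvCtx) (j : Nat) (hj : j < C.servers.length) :
    C.servers.getD j "" ∈ C.servers := by
  rw [List.getD_eq_getElem?_getD, List.getElem?_eq_getElem hj]
  exact List.getElem_mem hj

-- one step: position j (a key of nc) receives a further `a` instances in one dict write
theorem pvState_step (C : PvCtx) (nc : PySem.Dict String (PySem.Dict String Int))
    (f : Nat → Int) (j : Nat) (hj : j < C.servers.length) (hf : 0 ≤ f j) (a : Int) (ha : 0 < a)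
    (h : pvState C nc f) :
    pvState C
      (nc.modify (C.servers.getD j "") PySem.Dict.empty
        (fun svcs => svcs.insert C.service (svcs.getD C.service 0 + a)))
      (fun t => if t = j then f t + a else f t) := by
  obtain ⟨hk, hg⟩ := h
  have hmemj : C.servers.getD j "" ∈ C.servers := pvServers_getD_mem C j hj
  have hcont : nc.contains (C.servers.getD j "") = true := by
    rw [PySem.Dict.contains_iff_mem_keys, hk]
    rw [← PySem.Dict.contains_iff_mem_keys]
    exact C.hmem _ hmemj
  constructor
  · rw [PySem.Dict.keys_modify, PySem.Dict.keys_insert_of_contains _ _ hcont, hk]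
  · intro s
    rw [PySem.Dict.getD_modify]
    by_cases hs : s = C.servers.getD j ""
    · subst hs
      rw [if_pos rfl, hg _]
      unfold pvSpecGet
      rw [pvIdx?_getD C.servers C.hnodup j hj]
      simp only [if_true]
      have hpos : 0 < f j + a := by omega
      by_cases h0 : 0 < f j
      · rw [if_pos h0, if_pos hpos, PySem.Dict.getD_insert_self,
          PySem.Dict.insert_insert_self, add_assoc]
      · have hz : f j = 0 := by omega
        rw [if_neg h0, if_pos hpos, hz, zero_add]
    · rw [if_neg hs, hg s]
      unfold pvSpecGet
      cases hidx : pvIdx? C.servers s with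
      | none => rfl
      | some t =>
        have ht : t ≠ j := by
          rintro rfl
          exact hs ((pvIdx?_eq C.servers s t hidx).2.symm)
        simp only
        rw [if_neg ht]

theorem pvGetD_set (l : List Int) (j : Nat) (v : Int) (hj : j < l.length) (t : Nat) :
    (l.set j v).getD t 0 = if t = j then v else l.getD t 0 := by
  rw [List.getD_eq_getElem?_getD, List.getD_eq_getElem?_getD, List.getElem?_set]
  by_cases h : t = j
  · subst h; rw [if_pos rfl, if_pos rfl, if_pos hj]; rfl
  · rw [if_neg h, if_neg (fun hh => h hh.symm)]

theorem pvNonneg_step (f : Nat → Int) (hf : ∀ t, 0 ≤ f t) (j : Nat) (a : Int) (ha : 0 ≤ a)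
    (t : Nat) : 0 ≤ (if t = j then f t + a else f t) := by
  have := hf t; split <;> omega

-- partial round that does NOT exhaust count: all n positions j..j+n-1 bumped once
theorem pvInnerA_pass (C : PvCtx) :
    ∀ (n j : Nat) (load : List Int) (nc : PySem.Dict String (PySem.Dict String Int))
      (f : Nat → Int) (c : Int),
      pvState C nc f → (∀ t, 0 ≤ f t) → j + n ≤ C.servers.length →
      load.length = C.servers.length + 1 → (n : Int) < c →
      ∃ load' nc',
        pvInnerA C.service C.servers (List.range' j n) load nc c = .inl (load', nc', c - n) ∧
        load'.length = load.length ∧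
        (∀ t, load'.getD t 0 = load.getD t 0 + (if j ≤ t ∧ t < j + n then 1 else 0)) ∧
        pvState C nc' (fun t => f t + (if j ≤ t ∧ t < j + n then 1 else 0))
  | 0, j, load, nc, f, c, hst, hf, hjn, hlen, hc => by
    refine ⟨load, nc, ?_, rfl, ?_, ?_⟩
    · simp [pvInnerA]
    · intro t; simp
    · exact pvState_congr C nc f _ (fun t => by simp) hst
  | n + 1, j, load, nc, f, c, hst, hf, hjn, hlen, hc => by
    have hj : j < load.length := by omega
    have hjs : j < C.servers.length := by omega
    have hc1 : ¬(c - 1 = 0) := by omega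
    have hstep := pvState_step C nc f j hjs (hf j) 1 (by omega) hst
    have hrec := pvInnerA_pass C n (j + 1) (load.set j (load.getD j 0 + 1))
      (nc.modify (C.servers.getD j "") PySem.Dict.empty
        (fun svcs => svcs.insert C.service (svcs.getD C.service 0 + 1)))
      (fun t => if t = j then f t + 1 else f t) (c - 1)
      hstep (pvNonneg_step f hf j 1 (by omega))
      (by omega) (by simpa using hlen) (by push_cast; omega)
    obtain ⟨load', nc', heq, hlen', hload', hst'⟩ := hrec
    refine ⟨load', nc', ?_, by simpa using hlen', ?_, ?_⟩
    · rw [List.range'_succ]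
      show pvInnerA C.service C.servers (j :: List.range' (j+1) n) load nc c = _
      simp only [pvInnerA, pvSvcBump]
      rw [if_neg hc1, heq]
      congr 1
      push_cast
      ring_nf
    · intro t
      rw [hload' t, pvGetD_set load j _ hj t]
      by_cases h : t = j
      · subst h; split_ifs <;> omega
      · split_ifs <;> omega
    · refine pvState_congr C nc' _ _ (fun t => ?_) hst'
      dsimp only
      by_cases h : t = j
      · subst h; split_ifs <;> omega
      · split_ifs <;> omega

-- partial round that exhausts count: positions j..j+c-1 bumped, early return
theorem pvInnerA_ret (C : PvCtx) :
    ∀ (n j : Nat) (load : List Int) (nc : PySem.Dict String (PySem.Dict String Int))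
      (f : Nat → Int) (c : Int),
      pvState C nc f → (∀ t, 0 ≤ f t) → j + n ≤ C.servers.length →
      load.length = C.servers.length + 1 → 1 ≤ c → c ≤ (n : Int) →
      ∃ nc',
        pvInnerA C.service C.servers (List.range' j n) load nc c = .inr nc' ∧
        pvState C nc' (fun t => f t + (if j ≤ t ∧ t < j + c.toNat then 1 else 0))
  | 0, j, load, nc, f, c, hst, hf, hjn, hlen, hc1, hc => by
    exfalso; simp at hc; omega
  | n + 1, j, load, nc, f, c, hst, hf, hjn, hlen, hc1, hc => by
    have hj : j < load.length := by omega
    have hjs : j < C.servers.length := by omega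
    have hstep := pvState_step C nc f j hjs (hf j) 1 (by omega) hst
    by_cases hend : c - 1 = 0
    · refine ⟨nc.modify (C.servers.getD j "") PySem.Dict.empty
        (fun svcs => svcs.insert C.service (svcs.getD C.service 0 + 1)), ?_, ?_⟩
      · rw [List.range'_succ]
        show pvInnerA C.service C.servers (j :: List.range' (j+1) n) load nc c = _
        simp only [pvInnerA, pvSvcBump]
        rw [if_pos hend]
      · refine pvState_congr C _ _ _ (fun t => ?_) hstep
        dsimp only
        by_cases h : t = j
        · subst h; split_ifs <;> omega
        · split_ifs <;> omega
    · have hrec := pvInnerA_ret C n (j + 1) (load.set j (load.getD j 0 + 1))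
        (nc.modify (C.servers.getD j "") PySem.Dict.empty
          (fun svcs => svcs.insert C.service (svcs.getD C.service 0 + 1)))
        (fun t => if t = j then f t + 1 else f t) (c - 1)
        hstep (pvNonneg_step f hf j 1 (by omega))
        (by omega) (by simpa using hlen) (by omega) (by push_cast; omega)
      obtain ⟨nc', heq, hst'⟩ := hrec
      refine ⟨nc', ?_, ?_⟩
      · rw [List.range'_succ]
        show pvInnerA C.service C.servers (j :: List.range' (j+1) n) load nc c = _
        simp only [pvInnerA, pvSvcBump]
        rw [if_neg hend, heq]
      · refine pvState_congr C nc' _ _ (fun t => ?_) hst'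
        dsimp only
        by_cases h : t = j
        · subst h; split_ifs <;> omega
        · split_ifs <;> omega

-- while-loop, terminating case: count is exhausted before the prefix 0..i reaches load[i+1]
theorem pvWhileA_ret (C : PvCtx) :
    ∀ (fuel i : Nat) (load : List Int) (nc : PySem.Dict String (PySem.Dict String Int))
      (f : Nat → Int) (c : Int),
      pvState C nc f → (∀ t, 0 ≤ f t) → i < C.servers.length →
      load.length = C.servers.length + 1 →
      1 ≤ c → c ≤ ((i : Int) + 1) * (load.getD (i + 1) 0 - load.getD i 0) →
      c.toNat ≤ fuel →
      ∃ nc',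
        pvWhileA C.service C.servers fuel i load nc c = .inr (some nc') ∧
        pvState C nc' (fun t =>
          f t + (if t < i + 1 then
            c / ((i : Int) + 1) + (if (t : Int) < c % ((i : Int) + 1) then 1 else 0) else 0))
  | 0, i, load, nc, f, c, hst, hf, hi, hlen, hc1, hcb, hfuel => by omega
  | fuel + 1, i, load, nc, f, c, hst, hf, hi, hlen, hc1, hcb, hfuel => by
    have hk0 : ((i : Int) + 1) ≠ 0 := by omega
    have hvw : load.getD i 0 < load.getD (i + 1) 0 := by nlinarith
    by_cases hck : c ≤ (i : Int) + 1
    · obtain ⟨nc', heq, hst'⟩ := pvInnerA_ret C (i + 1) 0 load nc f c hst hf (by omega) hlen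
        hc1 (by push_cast; omega)
      refine ⟨nc', ?_, ?_⟩
      · simp only [pvWhileA]
        rw [if_pos hvw, List.range_eq_range', heq]
      · refine pvState_congr C nc' _ _ (fun t => ?_) hst'
        by_cases hceq : c = (i : Int) + 1
        · rw [hceq, Int.ediv_self hk0, Int.emod_self]
          split_ifs <;> omega
        · rw [Int.ediv_eq_zero_of_lt (by omega) (by omega),
            Int.emod_eq_of_lt (by omega) (by omega)]
          split_ifs <;> omega
    · obtain ⟨load', nc', heq, hlen', hload', hst'⟩ :=
        pvInnerA_pass C (i + 1) 0 load nc f c hst hf (by omega) hlen (by push_cast; omega)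
      have hv' : load'.getD i 0 = load.getD i 0 + 1 := by
        rw [hload' i]; rw [if_pos ⟨by omega, by omega⟩]
      have hw' : load'.getD (i + 1) 0 = load.getD (i + 1) 0 := by
        rw [hload' (i + 1)]; rw [if_neg (by omega)]; ring
      have hmul : ((i : Int) + 1) * (load'.getD (i + 1) 0 - load'.getD i 0)
          = ((i : Int) + 1) * (load.getD (i + 1) 0 - load.getD i 0) - ((i : Int) + 1) := by
        rw [hv', hw']; ring
      obtain ⟨nc'', heq'', hst''⟩ := pvWhileA_ret C fuel i load' nc' _ (c - (i + 1))
        hst' (fun t => by have := hf t; split <;> omega)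
        hi (hlen'.trans hlen) (by push_cast; omega)
        (by push_cast at hmul ⊢; omega) (by omega)
      refine ⟨nc'', ?_, ?_⟩
      · simp only [pvWhileA]
        rw [if_pos hvw, List.range_eq_range', heq]
        push_cast
        exact heq''
      · refine pvState_congr C nc'' _ _ (fun t => ?_) hst''
        have hd : (c - ((i : Int) + 1)) / ((i : Int) + 1) = c / ((i : Int) + 1) - 1 := by
          have h := Int.add_mul_ediv_right c (-1) hk0
          rw [show c + -1 * ((i : Int) + 1) = c - ((i : Int) + 1) by ring] at h
          omega
        have hm : (c - ((i : Int) + 1)) % ((i : Int) + 1) = c % ((i : Int) + 1) :=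
          Int.sub_emod_right c _
        rw [hd, hm]
        split_ifs <;> omega

-- while-loop, pass-through case: the prefix 0..i is levelled up to load[i+1], count survives
theorem pvWhileA_pass (C : PvCtx) :
    ∀ (fuel i : Nat) (load : List Int) (nc : PySem.Dict String (PySem.Dict String Int))
      (f : Nat → Int) (c : Int),
      pvState C nc f → (∀ t, 0 ≤ f t) → i < C.servers.length →
      load.length = C.servers.length + 1 →
      1 ≤ c → load.getD i 0 ≤ load.getD (i + 1) 0 →
      ((i : Int) + 1) * (load.getD (i + 1) 0 - load.getD i 0) < c →
      (load.getD (i + 1) 0 - load.getD i 0).toNat < fuel →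
      ∃ load' nc',
        pvWhileA C.service C.servers fuel i load nc c =
          .inl (load', nc', c - ((i : Int) + 1) * (load.getD (i + 1) 0 - load.getD i 0)) ∧
        load'.length = load.length ∧
        (∀ t, load'.getD t 0 = load.getD t 0 +
          (if t < i + 1 then load.getD (i + 1) 0 - load.getD i 0 else 0)) ∧
        pvState C nc' (fun t =>
          f t + (if t < i + 1 then load.getD (i + 1) 0 - load.getD i 0 else 0))
  | 0, i, load, nc, f, c, hst, hf, hi, hlen, hc1, hvw, hcb, hfuel => by omega
  | fuel + 1, i, load, nc, f, c, hst, hf, hi, hlen, hc1, hvw, hcb, hfuel => by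
    by_cases hlt : load.getD i 0 < load.getD (i + 1) 0
    · have hg1 : 1 ≤ load.getD (i + 1) 0 - load.getD i 0 := by omega
      have hkc : ((i : Int) + 1) ≤ ((i : Int) + 1) * (load.getD (i + 1) 0 - load.getD i 0) := by
        nlinarith
      obtain ⟨load', nc', heq, hlen', hload', hst'⟩ :=
        pvInnerA_pass C (i + 1) 0 load nc f c hst hf (by omega) hlen (by push_cast; omega)
      have hv' : load'.getD i 0 = load.getD i 0 + 1 := by
        rw [hload' i]; rw [if_pos ⟨by omega, by omega⟩]
      have hw' : load'.getD (i + 1) 0 = load.getD (i + 1) 0 := by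
        rw [hload' (i + 1)]; rw [if_neg (by omega)]; ring
      have hmulsplit : ((i : Int) + 1) * (load.getD (i + 1) 0 - load.getD i 0)
          = ((i : Int) + 1) * (load'.getD (i + 1) 0 - load'.getD i 0) + ((i : Int) + 1) := by
        rw [hv', hw']; ring
      obtain ⟨load'', nc'', heq'', hlen'', hload'', hst''⟩ :=
        pvWhileA_pass C fuel i load' nc' _ (c - (i + 1))
          hst' (fun t => by have := hf t; split <;> omega)
          hi (hlen'.trans hlen) (by push_cast; omega) (by omega)
          (by push_cast at hmulsplit ⊢; omega) (by omega)
      refine ⟨load'', nc'', ?_, hlen''.trans (hlen'.trans (by rfl)), ?_, ?_⟩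
      · simp only [pvWhileA]
        rw [if_pos hlt, List.range_eq_range', heq]
        have : (c - (((i:Nat) + 1 : Nat) : Int)) - ((i : Int) + 1) * (load'.getD (i + 1) 0 - load'.getD i 0)
            = c - ((i : Int) + 1) * (load.getD (i + 1) 0 - load.getD i 0) := by
          push_cast at hmulsplit ⊢; omega
        rw [← this]
        exact heq''
      · intro t
        rw [hload'' t, hload' t, hv', hw']
        by_cases h : t < i + 1
        · rw [if_pos h, if_pos h, if_pos ⟨by omega, by omega⟩]; ring
        · rw [if_neg h, if_neg h, if_neg (by omega)]; ring
      · refine pvState_congr C nc'' _ _ (fun t => ?_) hst''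
        rw [hv', hw']
        split_ifs <;> omega
    · have hveq : load.getD i 0 = load.getD (i + 1) 0 := by omega
      refine ⟨load, nc, ?_, rfl, ?_, ?_⟩
      · simp only [pvWhileA]
        rw [if_neg hlt]
        congr 2
        rw [hveq]
        ring
      · intro t; rw [hveq]; split_ifs <;> ring
      · refine pvState_congr C nc f _ (fun t => ?_) hst
        rw [hveq]
        split_ifs <;> ring_nf

-- prefix sums / cost of levelling the first i servers to L i
def pvP (C : PvCtx) (i : Nat) : Int := ((List.range i).map (fun t => C.L.getD t 0)).sum

def pvCst (C : PvCtx) (i : Nat) : Int := (i : Int) * C.L.getD i 0 - pvP C i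

-- totals after the stages before stage i have completed
def pvF (C : PvCtx) (i : Nat) : Nat → Int :=
  fun t => if t < i then C.L.getD i 0 - C.L.getD t 0 else 0

-- the final totals produced by A's loop from stage i on with count c (m = #stages left)
def pvFinalF (C : PvCtx) : Nat → Nat → Int → (Nat → Int)
  | 0, i, _ => pvF C i
  | m + 1, i, c =>
    if c ≤ ((i : Int) + 1) * (C.L.getD (i + 1) 0 - C.L.getD i 0) then
      fun t => pvF C i t +
        (if t < i + 1 then
          c / ((i : Int) + 1) + (if (t : Int) < c % ((i : Int) + 1) then 1 else 0) else 0)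
    else pvFinalF C m (i + 1) (c - ((i : Int) + 1) * (C.L.getD (i + 1) 0 - C.L.getD i 0))

theorem pvP_succ (C : PvCtx) (i : Nat) : pvP C (i + 1) = pvP C i + C.L.getD i 0 := by
  unfold pvP
  rw [List.range_succ, List.map_append, List.sum_append]
  simp

theorem pvCst_succ (C : PvCtx) (i : Nat) :
    pvCst C (i + 1) = pvCst C i + ((i : Int) + 1) * (C.L.getD (i + 1) 0 - C.L.getD i 0) := by
  unfold pvCst
  rw [pvP_succ]
  push_cast
  ring

theorem pvF_nonneg (C : PvCtx) (i : Nat) (hi : i ≤ C.servers.length) (t : Nat) :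
    0 ≤ pvF C i t := by
  unfold pvF
  split
  · rename_i h
    have : ∀ u v : Nat, u ≤ v → v ≤ C.servers.length → C.L.getD u 0 ≤ C.L.getD v 0 := by
      intro u v huv hv
      induction v with
      | zero => simp_all
      | succ v ih =>
        rcases Nat.lt_or_ge u (v + 1) with h' | h'
        · exact le_trans (ih (by omega) (by omega)) (C.hmono v (by omega))
        · have : u = v + 1 := by omega
          subst this; rfl
    linarith [this t i (by omega) hi]
  · rfl

-- A's outer loop from stage i on: returns with the totals pvFinalF
theorem pvOuterA_spec (C : PvCtx) :
    ∀ (m i : Nat) (load : List Int) (nc : PySem.Dict String (PySem.Dict String Int))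
      (c : Int) (fuel : Nat),
      i + m = C.servers.length →
      pvState C nc (pvF C i) →
      load.length = C.servers.length + 1 →
      (∀ t, i ≤ t → load.getD t 0 = C.L.getD t 0) →
      1 ≤ c → c + pvCst C i ≤ pvCst C C.servers.length →
      c.toNat ≤ fuel →
      ∃ nc',
        pvOuterA C.service C.servers fuel (List.range' i m) load nc c = some nc' ∧
        pvState C nc' (pvFinalF C m i c)
  | 0, i, load, nc, c, fuel, hm, hst, hlen, hload, hc1, hcap, hfuel => by
    exfalso
    have : i = C.servers.length := by omega
    subst this
    omega
  | m + 1, i, load, nc, c, fuel, hm, hst, hlen, hload, hc1, hcap, hfuel => by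
    have hiS : i < C.servers.length := by omega
    have hv : load.getD i 0 = C.L.getD i 0 := hload i (le_refl i)
    have hw : load.getD (i + 1) 0 = C.L.getD (i + 1) 0 := hload (i + 1) (by omega)
    have hvw : load.getD i 0 ≤ load.getD (i + 1) 0 := by
      rw [hv, hw]; exact C.hmono i (by omega)
    have hfn : ∀ t, 0 ≤ pvF C i t := pvF_nonneg C i (by omega)
    by_cases hc : c ≤ ((i : Int) + 1) * (load.getD (i + 1) 0 - load.getD i 0)
    · obtain ⟨nc', heq, hst'⟩ :=
        pvWhileA_ret C fuel i load nc (pvF C i) c hst hfn hiS hlen hc1 hc (by omega)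
      refine ⟨nc', ?_, ?_⟩
      · rw [List.range'_succ]
        show pvOuterA C.service C.servers fuel (i :: List.range' (i+1) m) load nc c = _
        simp only [pvOuterA]
        rw [heq]
      · rw [show pvFinalF C (m + 1) i c =
            fun t => pvF C i t + (if t < i + 1 then
              c / ((i : Int) + 1) + (if (t : Int) < c % ((i : Int) + 1) then 1 else 0) else 0) by
          rw [pvFinalF, if_pos (by rw [← hv, ← hw]; exact hc)]]
        exact hst'
    · have hg0 : 0 ≤ load.getD (i + 1) 0 - load.getD i 0 := by omega
      have hX0 : 0 ≤ ((i : Int) + 1) * (load.getD (i + 1) 0 - load.getD i 0) :=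
        mul_nonneg (by omega) hg0
      have hgc : load.getD (i + 1) 0 - load.getD i 0 < c := by nlinarith
      have hcst := pvCst_succ C i
      obtain ⟨load', nc', heq, hlen', hload', hst'⟩ :=
        pvWhileA_pass C fuel i load nc (pvF C i) c hst hfn hiS hlen hc1 hvw (by omega)
          (by omega)
      have hcap' : c - ((i : Int) + 1) * (load.getD (i + 1) 0 - load.getD i 0)
            + pvCst C (i + 1) ≤ pvCst C C.servers.length := by
        rw [hv, hw, hcst]
        omega
      have hc1' : 1 ≤ c - ((i : Int) + 1) * (load.getD (i + 1) 0 - load.getD i 0) := by omega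
      have hfuel' : (c - ((i : Int) + 1) * (load.getD (i + 1) 0 - load.getD i 0)).toNat ≤ fuel := by
        omega
      obtain ⟨nc'', heq'', hst''⟩ := pvOuterA_spec C m (i + 1) load' nc'
        (c - ((i : Int) + 1) * (load.getD (i + 1) 0 - load.getD i 0)) fuel
        (by omega)
        (by
          refine pvState_congr C nc' _ _ (fun t => ?_) hst'
          unfold pvF
          rw [hv, hw]
          rcases Nat.lt_trichotomy t i with h | h | h
          · split_ifs <;> omega
          · subst h; split_ifs <;> omega
          · split_ifs <;> omega)
        (hlen'.trans hlen)
        (by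
          intro t ht
          rw [hload' t, if_neg (by omega), hload t (by omega)]
          ring)
        hc1'
        hcap'
        hfuel'
      refine ⟨nc'', ?_, ?_⟩
      · rw [List.range'_succ]
        show pvOuterA C.service C.servers fuel (i :: List.range' (i+1) m) load nc c = _
        simp only [pvOuterA]
        rw [heq]
        exact heq''
      · rw [show pvFinalF C (m + 1) i c = pvFinalF C m (i + 1)
            (c - ((i : Int) + 1) * (C.L.getD (i + 1) 0 - C.L.getD i 0)) by
          rw [pvFinalF, if_neg (by rw [← hv, ← hw]; exact hc)]]
        rw [← hv, ← hw]
        exact hst''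

-- the totals of the finishing stage k-1 written with the prefix sum P k (B's closed form)
theorem pvThen (C : PvCtx) (j t : Nat) (c : Int) :
    pvF C j t + (if t < j + 1 then
      (c - pvCst C j) / ((j : Int) + 1) +
        (if (t : Int) < (c - pvCst C j) % ((j : Int) + 1) then 1 else 0) else 0)
    = if t < j + 1 then
        (c + pvP C (j + 1)) / ((j : Int) + 1) - C.L.getD t 0 +
          (if (t : Int) < (c + pvP C (j + 1)) % ((j : Int) + 1) then 1 else 0)
      else 0 := by
  have hk : ((j : Int) + 1) ≠ 0 := by omega
  have harg : c - pvCst C j + C.L.getD j 0 * ((j : Int) + 1) = c + pvP C (j + 1) := by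
    unfold pvCst
    rw [pvP_succ]
    ring
  have hd : (c - pvCst C j) / ((j : Int) + 1)
      = (c + pvP C (j + 1)) / ((j : Int) + 1) - C.L.getD j 0 := by
    have h := Int.add_mul_ediv_right (c - pvCst C j) (C.L.getD j 0) hk
    rw [harg] at h
    omega
  have hm : (c - pvCst C j) % ((j : Int) + 1) = (c + pvP C (j + 1)) % ((j : Int) + 1) := by
    rw [← harg]
    exact (Int.add_mul_emod_self_right _ _ _).symm
  rw [hd, hm]
  unfold pvF
  rcases Nat.lt_trichotomy t j with h | h | h
  · split_ifs <;> omega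
  · subst h; split_ifs <;> omega
  · split_ifs <;> omega

-- B's prefix scan finds the finishing stage; its (k, P) rewrite A's totals into B's closed form
theorem pvFindK_spec (C : PvCtx) (ld : List Int) (hL : C.L = ld ++ [(999999999 : Int)])
    (hlenld : ld.length = C.servers.length) :
    ∀ (m j : Nat) (c : Int),
      (j + 1) + m = C.servers.length →
      pvCst C j < c → c ≤ pvCst C C.servers.length →
      ∃ k P,
        pvFindK ld c (List.range' (j + 1) m) (pvP C j) = (k, P) ∧
        1 ≤ k ∧ k ≤ C.servers.length ∧ P = pvP C k ∧
        (∀ t, pvFinalF C (m + 1) j (c - pvCst C j) t =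
          if t < k then
            (c + P) / (k : Int) - C.L.getD t 0 +
              (if (t : Int) < (c + P) % (k : Int) then 1 else 0)
          else 0)
  | 0, j, c, hm, hlow, hhigh => by
    have hjS : j + 1 = C.servers.length := by omega
    have hgj : ld.getD j 0 = C.L.getD j 0 := by
      rw [hL, List.getD_append _ _ 0 j (by omega)]
    refine ⟨j + 1, pvP C (j + 1), ?_, by omega, by omega, rfl, ?_⟩
    · show pvFindK ld c [] (pvP C j) = _
      simp only [pvFindK]
      rw [hlenld, ← hjS]
      rw [show j + 1 - 1 = j from rfl, hgj, pvP_succ]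
    · intro t
      have hcond : c - pvCst C j ≤ ((j : Int) + 1) * (C.L.getD (j + 1) 0 - C.L.getD j 0) := by
        have := pvCst_succ C j
        rw [← hjS] at hhigh
        omega
      rw [pvFinalF, if_pos hcond]
      rw [show ((j + 1 : Nat) : Int) = (j : Int) + 1 by push_cast; ring]
      exact pvThen C j t c
  | m + 1, j, c, hm, hlow, hhigh => by
    have hj1S : j + 1 < C.servers.length := by omega
    have hgj : ld.getD j 0 = C.L.getD j 0 := by
      rw [hL, List.getD_append _ _ 0 j (by omega)]
    have hgj1 : ld.getD (j + 1) 0 = C.L.getD (j + 1) 0 := by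
      rw [hL, List.getD_append _ _ 0 (j + 1) (by omega)]
    have hcsteq : ((j + 1 : Nat) : Int) * ld.getD (j + 1) 0 - (pvP C j + ld.getD j 0)
        = pvCst C (j + 1) := by
      rw [hgj, hgj1]
      unfold pvCst
      rw [pvP_succ]
    have hcst := pvCst_succ C j
    rw [List.range'_succ]
    by_cases hstop : c ≤ ((j + 1 : Nat) : Int) * ld.getD (j + 1) 0 - (pvP C j + ld.getD j 0)
    · refine ⟨j + 1, pvP C (j + 1), ?_, by omega, by omega, rfl, ?_⟩
      · show pvFindK ld c ((j + 1) :: List.range' (j + 2) m) (pvP C j) = _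
        simp only [pvFindK]
        rw [show j + 1 - 1 = j from rfl, hgj]
        rw [if_pos (by rw [← hgj]; exact hstop), pvP_succ]
      · intro t
        rw [hcsteq] at hstop
        have hcond : c - pvCst C j ≤ ((j : Int) + 1) * (C.L.getD (j + 1) 0 - C.L.getD j 0) := by
          omega
        rw [pvFinalF, if_pos hcond]
        rw [show ((j + 1 : Nat) : Int) = (j : Int) + 1 by push_cast; ring]
        exact pvThen C j t c
    · rw [hcsteq] at hstop
      obtain ⟨k, P, heq, hk1, hkS, hP, hform⟩ :=
        pvFindK_spec C ld hL hlenld m (j + 1) c (by omega) (by omega) hhigh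
      refine ⟨k, P, ?_, hk1, hkS, hP, ?_⟩
      · show pvFindK ld c ((j + 1) :: List.range' (j + 2) m) (pvP C j) = _
        simp only [pvFindK]
        rw [show j + 1 - 1 = j from rfl, hgj]
        rw [if_neg (by rw [← hgj, hcsteq]; exact hstop), ← pvP_succ]
        exact heq
      · intro t
        have hcond : ¬(c - pvCst C j ≤ ((j : Int) + 1) * (C.L.getD (j + 1) 0 - C.L.getD j 0)) := by
          omega
        rw [pvFinalF, if_neg hcond]
        rw [show c - pvCst C j - ((j : Int) + 1) * (C.L.getD (j + 1) 0 - C.L.getD j 0)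
            = c - pvCst C (j + 1) by omega]
        exact hform t

theorem pvState_init (C : PvCtx) : pvState C C.nc0 (fun _ => 0) := by
  refine ⟨rfl, fun s => ?_⟩
  unfold pvSpecGet
  cases pvIdx? C.servers s with
  | none => rfl
  | some t => simp

theorem pvSpecGet_nonpos_congr (C : PvCtx) (f g : Nat → Int)
    (h : ∀ t, f t = g t ∨ (f t ≤ 0 ∧ g t ≤ 0)) (s : String) :
    pvSpecGet C f s = pvSpecGet C g s := by
  unfold pvSpecGet
  cases pvIdx? C.servers s with
  | none => rfl
  | some t =>
    dsimp only
    rcases h t with h' | ⟨h1, h2⟩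
    · simp [h']
    · rw [if_neg (by omega), if_neg (by omega)]

theorem pvState_nonpos_congr (C : PvCtx) (nc : PySem.Dict String (PySem.Dict String Int))
    (f g : Nat → Int) (h : ∀ t, f t = g t ∨ (f t ≤ 0 ∧ g t ≤ 0)) (hs : pvState C nc f) :
    pvState C nc g :=
  ⟨hs.1, fun s => (hs.2 s).trans (pvSpecGet_nonpos_congr C f g h s)⟩

-- B's single application loop: position t of the sorted prefix gets its whole allotment at once
theorem pvFoldB_spec (C : PvCtx) (pairs : List (String × Int))
    (hsrv : C.servers = pairs.map (·.1)) (hL : C.L = pairs.map (·.2) ++ [(999999999 : Int)])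
    (level extra : Int) :
    ∀ k, k ≤ C.servers.length →
      pvState C
        ((List.range k).foldl (fun d pos =>
          if 0 < level - (pairs.getD pos ("", 0)).2 + (if (pos : Int) < extra then 1 else 0) then
            pvAddB d (pairs.getD pos ("", 0)).1 C.service
              (level - (pairs.getD pos ("", 0)).2 + (if (pos : Int) < extra then 1 else 0))
          else d) C.nc0)
        (fun t => if t < k then level - C.L.getD t 0 + (if (t : Int) < extra then 1 else 0) else 0) := by
  have hplen : pairs.length = C.servers.length := by rw [hsrv, List.length_map]
  intro k
  induction k with
  | zero =>
    intro _
    refine pvState_congr C C.nc0 _ _ (fun t => by simp) (pvState_init C)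
  | succ k ih =>
    intro hk
    have hkp : k < pairs.length := by omega
    have hfst : (pairs.getD k ("", 0)).1 = C.servers.getD k "" := by
      rw [hsrv, List.getD_eq_getElem?_getD, List.getD_eq_getElem?_getD,
        List.getElem?_eq_getElem hkp, List.getElem?_eq_getElem (by rw [List.length_map]; omega)]
      simp
    have hsnd : (pairs.getD k ("", 0)).2 = C.L.getD k 0 := by
      rw [hL, List.getD_eq_getElem?_getD, List.getD_eq_getElem?_getD,
        List.getElem?_eq_getElem hkp,
        List.getElem?_eq_getElem (by rw [List.length_append, List.length_map]; simp; omega)]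
      rw [List.getElem_append_left (by rw [List.length_map]; omega)]
      simp
    have hprev := ih (by omega)
    rw [List.range_succ, List.foldl_append, List.foldl_cons, List.foldl_nil]
    set a := level - (pairs.getD k ("", 0)).2 + (if (k : Int) < extra then 1 else 0) with ha
    by_cases hpos : 0 < a
    · rw [if_pos hpos, hfst]
      have hstep := pvState_step C _ _ k (by omega) (by simp) a hpos hprev
      refine pvState_nonpos_congr C _ _ _ (fun t => ?_) hstep
      by_cases ht : t = k
      · subst ht
        left
        rw [if_pos rfl, if_neg (by omega), if_pos (by omega), ha, hsnd]
        ring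
      · left
        rw [if_neg ht]
        split_ifs <;> omega
    · rw [if_neg hpos]
      refine pvState_nonpos_congr C _ _ _ (fun t => ?_) hprev
      by_cases ht : t = k
      · subst ht
        right
        rw [hsnd] at ha
        constructor
        · rw [if_neg (by omega)]
        · rw [if_pos (by omega)]; omega
      · left
        split_ifs <;> omega

theorem pvCst_zero (C : PvCtx) : pvCst C 0 = 0 := by simp [pvCst, pvP]

theorem pvGetD_last (l : List Int) (x : Int) : (l ++ [x]).getD l.length 0 = x := by
  rw [List.getD_eq_getElem?_getD, List.getElem?_append_right (le_refl _)]
  simp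

theorem pvGetD_left (l l' : List Int) (u : Nat) (hu : u < l.length) :
    (l ++ l').getD u 0 = l.getD u 0 :=
  List.getD_append l l' 0 u hu

theorem pvRangeMap_getD (l : List Int) (M : Int) :
    ((List.range l.length).map (fun t => (l ++ [M]).getD t 0)).sum = l.sum := by
  have h1 : (List.range l.length).map (fun t => (l ++ [M]).getD t 0) = l := by
    apply List.ext_getElem
    · simp
    · intro i h1 h2
      simp only [List.getElem_map, List.getElem_range]
      rw [pvGetD_left l [M] i h2, List.getD_eq_getElem?_getD, List.getElem?_eq_getElem h2]
      rfl
  rw [h1]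

theorem pvSum_sub (xs : List Int) :
    (xs.map (fun l => (999999999 : Int) - l)).sum = (xs.length : Int) * 999999999 - xs.sum := by
  induction xs with
  | nil => simp
  | cons a xs ih =>
    simp only [List.map_cons, List.sum_cons, ih, List.length_cons]
    push_cast
    ring

-- build the proof context from the shared preprocessing of the two ports
theorem pvBuildCtx (service : String) (nc0 : PySem.Dict String (PySem.Dict String Int))
    (hkeysnd : nc0.keys.Nodup)
    (hbound : ∀ l ∈ nc0.items.map (fun p => p.2.values.sum), l ≤ 999999999) :
    ∃ C : PvCtx, C.service = service ∧ C.nc0 = nc0 ∧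
      C.servers = (PySem.List.sorted (nc0.items.map (fun p => (p.1, p.2.values.sum)))
        (fun q => q.2) false).map (·.1) ∧
      C.L = (PySem.List.sorted (nc0.items.map (fun p => (p.1, p.2.values.sum)))
        (fun q => q.2) false).map (·.2) ++ [(999999999 : Int)] := by
  have hperm : (PySem.List.sorted (nc0.items.map (fun p => (p.1, p.2.values.sum)))
      (fun q => q.2) false).Perm (nc0.items.map (fun p => (p.1, p.2.values.sum))) :=
    PySem.List.sorted_perm _ _ _
  have hpermS : ((PySem.List.sorted (nc0.items.map (fun p => (p.1, p.2.values.sum)))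
      (fun q => q.2) false).map (·.1)).Perm nc0.keys := by
    have h := hperm.map (·.1)
    rw [List.map_map] at h
    exact h
  have hpermL : ((PySem.List.sorted (nc0.items.map (fun p => (p.1, p.2.values.sum)))
      (fun q => q.2) false).map (·.2)).Perm (nc0.items.map (fun p => p.2.values.sum)) := by
    have h := hperm.map (·.2)
    rw [List.map_map] at h
    exact h
  have hgetlt : ∀ u, (hu : u < (PySem.List.sorted (nc0.items.map (fun p => (p.1, p.2.values.sum)))
      (fun q => q.2) false).length) →
      ((PySem.List.sorted (nc0.items.map (fun p => (p.1, p.2.values.sum)))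
        (fun q => q.2) false).map (·.2) ++ [(999999999 : Int)]).getD u 0 =
      ((PySem.List.sorted (nc0.items.map (fun p => (p.1, p.2.values.sum)))
        (fun q => q.2) false)[u]).2 := by
    intro u hu
    rw [pvGetD_left _ _ u (by simpa using hu), List.getD_eq_getElem?_getD,
      List.getElem?_eq_getElem (by simpa using hu)]
    simp
  refine ⟨⟨service,
    (PySem.List.sorted (nc0.items.map (fun p => (p.1, p.2.values.sum))) (fun q => q.2) false).map (·.1),
    (PySem.List.sorted (nc0.items.map (fun p => (p.1, p.2.values.sum))) (fun q => q.2) false).map (·.2)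
      ++ [(999999999 : Int)],
    nc0, by simp, ?_, hkeysnd, ?_, ?_⟩, rfl, rfl, rfl, rfl⟩
  · exact (hpermS.nodup_iff).mpr hkeysnd
  · intro s hs
    exact (PySem.Dict.contains_iff_mem_keys nc0 s).mpr (hpermS.mem_iff.mp hs)
  · intro t ht
    rw [List.length_map] at ht
    by_cases h2 : t + 1 < (PySem.List.sorted (nc0.items.map (fun p => (p.1, p.2.values.sum)))
        (fun q => q.2) false).length
    · rw [hgetlt t (by omega), hgetlt (t + 1) h2]
      exact PySem.List.key_sorted_getElem_mono (nc0.items.map (fun p => (p.1, p.2.values.sum)))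
        (fun q => q.2) (p := t) (q := t + 1) (by omega) h2
    · have ht1 : t + 1 = (PySem.List.sorted (nc0.items.map (fun p => (p.1, p.2.values.sum)))
          (fun q => q.2) false).length := by omega
      rw [hgetlt t (by omega)]
      rw [show t + 1 = ((PySem.List.sorted (nc0.items.map (fun p => (p.1, p.2.values.sum)))
          (fun q => q.2) false).map (·.2)).length by rw [List.length_map]; omega, pvGetD_last]
      have hmemt : (PySem.List.sorted (nc0.items.map (fun p => (p.1, p.2.values.sum)))
          (fun q => q.2) false)[t]'(by omega) ∈
          PySem.List.sorted (nc0.items.map (fun p => (p.1, p.2.values.sum)))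
            (fun q => q.2) false := by apply List.getElem_mem
      exact hbound _ (hpermL.mem_iff.mp (List.mem_map_of_mem hmemt))

-- the whole equivalence, phrased on the shared preprocessing of the two ports
theorem pvMain (service : String) (count : Int)
    (nc0 : PySem.Dict String (PySem.Dict String Int)) (pairs : List (String × Int))
    (hpairs : pairs = PySem.List.sorted (nc0.items.map (fun p => (p.1, p.2.values.sum)))
      (fun q => q.2) false)
    (hkeysnd : nc0.keys.Nodup)
    (hc1 : 1 ≤ count)
    (hbound : ∀ l ∈ nc0.items.map (fun p => p.2.values.sum), l ≤ 999999999)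
    (hcap : count ≤ ((nc0.items.map (fun p => p.2.values.sum)).map (fun l => 999999999 - l)).sum)
    (hne : nc0.items ≠ []) :
    (pvOuterA service (pairs.map (·.1)) (count.toNat + 1)
        (List.range (pairs.map (·.1)).length)
        (pairs.map (·.2) ++ [(999999999 : Int)]) nc0 count).map
      (fun d => d.items.map (fun p => (p.1, p.2.items)))
    = (if pairs = [] then none
       else if count ≤ 0 then some (nc0.items.map (fun p => (p.1, p.2.items)))
       else
         let n := pairs.length
         let kp := pvFindK (pairs.map (·.2)) count (List.range' 1 (n - 1)) 0
         let level := PySem.Int.floordiv (count + kp.2) (kp.1 : Int)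
         let extra := PySem.Int.mod (count + kp.2) (kp.1 : Int)
         let nc' := (List.range kp.1).foldl (fun d pos =>
             let pr := pairs.getD pos ("", 0)
             let a := level - pr.2 + (if (pos : Int) < extra then 1 else 0)
             if 0 < a then pvAddB d pr.1 service a else d) nc0
         some (nc'.items.map (fun p => (p.1, p.2.items)))) := by
  obtain ⟨C, hCsvc, hCn, hCserv, hCL⟩ := pvBuildCtx service nc0 hkeysnd hbound
  rw [← hpairs] at hCserv hCL
  have hperm0 : pairs.Perm (nc0.items.map (fun p => (p.1, p.2.values.sum))) := by
    rw [hpairs]; exact PySem.List.sorted_perm _ _ _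
  have hpermL : (pairs.map (·.2)).Perm (nc0.items.map (fun p => p.2.values.sum)) := by
    have h := hperm0.map (·.2)
    rw [List.map_map] at h
    exact h
  have hplen : 1 ≤ pairs.length := by
    rw [hperm0.length_eq, List.length_map]
    exact List.length_pos_iff.mpr hne
  have hSlen : C.servers.length = pairs.length := by rw [hCserv, List.length_map]
  have hpne : pairs ≠ [] := by
    intro h; rw [h] at hplen; simp at hplen
  rw [if_neg hpne, if_neg (by omega : ¬count ≤ 0)]
  -- capacity, written with pvCst
  have hLlast : C.L.getD C.servers.length 0 = 999999999 := by
    rw [hCL, show C.servers.length = (pairs.map (·.2)).length by rw [hSlen, List.length_map],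
      pvGetD_last]
  have hPsum : pvP C C.servers.length = (pairs.map (·.2)).sum := by
    unfold pvP
    rw [hCL, show C.servers.length = (pairs.map (·.2)).length by rw [hSlen, List.length_map]]
    exact pvRangeMap_getD _ _
  have hCstS : pvCst C C.servers.length
      = (C.servers.length : Int) * 999999999 - (pairs.map (·.2)).sum := by
    unfold pvCst
    rw [hPsum, hLlast]
  have hsum_eq : (pairs.map (·.2)).sum = (nc0.items.map (fun p => p.2.values.sum)).sum :=
    hpermL.sum_eq
  have hlen_eq : pairs.length = (nc0.items.map (fun p => p.2.values.sum)).length := by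
    have := hpermL.length_eq
    simpa using this
  have hcap' : count ≤ pvCst C C.servers.length := by
    rw [hCstS]
    rw [pvSum_sub (nc0.items.map (fun p => p.2.values.sum))] at hcap
    rw [hSlen]
    omega
  -- A's loop
  have hstate0 : pvState C nc0 (pvF C 0) := by
    have h := pvState_init C
    rw [hCn] at h
    exact pvState_congr C nc0 _ _ (fun t => by unfold pvF; rw [if_neg (by omega)]) h
  obtain ⟨ncA, heqA, hstA⟩ := pvOuterA_spec C C.servers.length 0
    (pairs.map (·.2) ++ [(999999999 : Int)]) nc0 count (count.toNat + 1)
    (by omega) hstate0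
    (by simp [hSlen])
    (fun t _ => by rw [hCL])
    hc1 (by rw [pvCst_zero]; omega) (by omega)
  have heqA' : pvOuterA service (pairs.map (·.1)) (count.toNat + 1)
      (List.range' 0 (pairs.map (·.1)).length)
      (pairs.map (·.2) ++ [(999999999 : Int)]) nc0 count = some ncA := by
    rw [← hCsvc, ← hCserv]
    rw [show (C.servers).length = C.servers.length from rfl]
    exact heqA
  -- the scan for k
  obtain ⟨k, P, heqK, hk1, hkS, hP, hform⟩ := pvFindK_spec C (pairs.map (·.2))
    hCL (by rw [hSlen, List.length_map]) (pairs.length - 1) 0 count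
    (by omega) (by rw [pvCst_zero]; omega) hcap'
  have heqK' : pvFindK (pairs.map (·.2)) count (List.range' 1 (pairs.length - 1)) 0 = (k, P) :=
    heqK
  have hmm1 : pairs.length - 1 + 1 = C.servers.length := by omega
  rw [hmm1] at hform
  rw [pvCst_zero, sub_zero] at hform
  -- B's fold
  have hk0 : (0 : Int) < (k : Int) := by omega
  have hlev : PySem.Int.floordiv (count + P) (k : Int) = (count + P) / (k : Int) :=
    PySem.Int.floordiv_eq_ediv_of_pos hk0
  have hmod : PySem.Int.mod (count + P) (k : Int) = (count + P) % (k : Int) :=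
    PySem.Int.mod_eq_emod_of_pos hk0
  have hfold := pvFoldB_spec C pairs hCserv hCL
    (PySem.Int.floordiv (count + P) (k : Int)) (PySem.Int.mod (count + P) (k : Int))
    k (by omega)
  rw [hCsvc, hCn] at hfold
  -- the two dicts agree
  have hkA : ncA.keys = nc0.keys := by
    have h := hstA.1
    rw [hCn] at h
    exact h
  have hkB : ((List.range k).foldl (fun d pos =>
      if 0 < PySem.Int.floordiv (count + P) (k : Int) - (pairs.getD pos ("", 0)).2 +
          (if (pos : Int) < PySem.Int.mod (count + P) (k : Int) then 1 else 0) then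
        pvAddB d (pairs.getD pos ("", 0)).1 service
          (PySem.Int.floordiv (count + P) (k : Int) - (pairs.getD pos ("", 0)).2 +
            (if (pos : Int) < PySem.Int.mod (count + P) (k : Int) then 1 else 0))
      else d) nc0).keys = nc0.keys := by
    have h := hfold.1
    rw [hCn] at h
    exact h
  have hAB : ncA = (List.range k).foldl (fun d pos =>
      if 0 < PySem.Int.floordiv (count + P) (k : Int) - (pairs.getD pos ("", 0)).2 +
          (if (pos : Int) < PySem.Int.mod (count + P) (k : Int) then 1 else 0) then
        pvAddB d (pairs.getD pos ("", 0)).1 service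
          (PySem.Int.floordiv (count + P) (k : Int) - (pairs.getD pos ("", 0)).2 +
            (if (pos : Int) < PySem.Int.mod (count + P) (k : Int) then 1 else 0))
      else d) nc0 := by
    apply PySem.Dict.ext
    rw [PySem.Dict.items_eq_map_keys ncA (by rw [hkA]; exact hkeysnd) PySem.Dict.empty,
      PySem.Dict.items_eq_map_keys _ (by rw [hkB]; exact hkeysnd) PySem.Dict.empty,
      hkA, hkB]
    apply List.map_congr_left
    intro s _
    have h1 := hstA.2 s
    have h2 := hfold.2 s
    rw [h1, h2]
    exact congrArg (fun d => (s, d))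
      (pvSpecGet_congr C _ _ (fun t => by rw [hform t, hlev, hmod]) s)
  -- finish
  rw [List.range_eq_range', heqA', Option.map_some]
  simp only [heqK']
  rw [hAB]

-- ===== VERDICT (by name: the statement is the Claim_ definition above) =====
theorem update_spec : Claim_equal_update := by
  unfold Claim_equal_update
  intro cluster service count _ hpre
  unfold Spec_update
  by_cases hnil : cluster = []
  · subst hnil; rfl
  · rcases hpre with h | ⟨hc1, hbound, hcap⟩
    · exact absurd h hnil
    · have hL0 : pvLoadsOf cluster =
          (PySem.Dict.ofList (cluster.map (fun p => (p.1, PySem.Dict.ofList p.2)))).items.map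
            (fun p => p.2.values.sum) := by
        unfold pvLoadsOf
        rw [show (PySem.Dict.ofList (cluster.map (fun p => (p.1, PySem.Dict.ofList p.2)))).values
            = (PySem.Dict.ofList (cluster.map (fun p => (p.1, PySem.Dict.ofList p.2)))).items.map
              (·.2) from rfl,
          List.map_map]
        rfl
      rw [hL0] at hbound hcap
      have hne : (PySem.Dict.ofList (cluster.map (fun p => (p.1, PySem.Dict.ofList p.2)))).items
          ≠ [] := by
        intro h
        rw [h] at hcap
        simp at hcap
        omega
      exact pvMain service count _ _ rfl (PySem.Dict.nodup_keys_ofList _) hc1 hbound hcap hne
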